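-- pv_equiv track=rewrite | github.com/stilab-ets/IAC-SATD | RQ1_Taxonomy_Construction/SATD_collector/CommentsMining/CommentExtractor.py | fusionner_commentaires_en_bloc
-- ===== SOURCE A (Python) =====
-- def fusionner_commentaires_en_bloc(comment_list):
--     blocs = []
--     bloc = [comment_list[0]]
--     for i in range(1, len(comment_list)):
--         if comment_list[i][1] == comment_list[i-1][1] + 1:
--             bloc.append(comment_list[i])
--         else:
--             blocs.append(bloc)
--             bloc = [comment_list[i]]
--     blocs.append(bloc)
--
--     resultat = []
--     for bloc in blocs:
--         concatenated_comment = '\n'.join(comment[0] for comment in bloc)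
--         resultat.append((concatenated_comment, bloc[0][1]))
--
--     return resultat
-- ===== SOURCE B (Python) =====
-- def fusionner_commentaires_en_bloc(comment_list):
--     # Back-to-front single pass: build the merged blocks directly, newest block
--     # kept at the end of the list, then reverse once at the end.
--     blocks = [comment_list[-1]]
--     for text, line in reversed(comment_list[:-1]):
--         top = blocks[-1]
--         if top[1] == line + 1:
--             blocks[-1] = (text + '\n' + top[0], line)
--         else:
--             blocks.append((text, line))
--     blocks.reverse()
--     return blocks
-- ===== Notes on version B (the rewrite author's own statement) =====
-- stated objective: simpler
-- what changed: A makes a forward two-pass (group entries into an intermediate list of blocks, then a second pass joining each block); B makes one backward pass that builds the merged (text, line) result directly, extending the block at the top of the accumulator, and reverses once at the end.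
import Mathlib
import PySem

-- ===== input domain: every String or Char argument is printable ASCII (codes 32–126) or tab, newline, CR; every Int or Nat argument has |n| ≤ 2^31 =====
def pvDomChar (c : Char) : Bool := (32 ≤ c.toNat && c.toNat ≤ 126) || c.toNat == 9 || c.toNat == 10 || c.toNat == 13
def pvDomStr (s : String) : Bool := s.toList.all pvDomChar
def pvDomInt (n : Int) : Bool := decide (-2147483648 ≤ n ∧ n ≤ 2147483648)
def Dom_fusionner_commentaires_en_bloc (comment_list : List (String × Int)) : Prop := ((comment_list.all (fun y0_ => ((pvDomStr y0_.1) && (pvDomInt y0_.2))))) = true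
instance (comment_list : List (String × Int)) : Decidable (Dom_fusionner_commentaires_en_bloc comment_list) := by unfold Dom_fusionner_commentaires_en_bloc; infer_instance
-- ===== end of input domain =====

-- B replaces A's forward two-pass (group into a list of blocks, then a second join pass)
-- by a single back-to-front pass that builds the merged result directly (objective: simpler).

-- ===== PORT A =====
def fusionner_commentaires_en_bloc (comment_list : List (String × Int)) : List (String × Int) :=
  match comment_list with
  | [] => []  -- comment_list[0] raises IndexError on an empty list: outside Pre_
  | c0 :: _ =>
    let st := (PySem.List.pyRange 1 (comment_list.length : Int) 1).foldl
      (fun (st : List (List (String × Int)) × List (String × Int)) i =>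
        let ci := PySem.List.pyGetD comment_list i ("", 0)
        let cp := PySem.List.pyGetD comment_list (i - 1) ("", 0)
        if ci.2 == cp.2 + 1 then (st.1, st.2 ++ [ci]) else (st.1 ++ [st.2], [ci]))
      ([], [c0])
    let blocs := st.1 ++ [st.2]
    blocs.foldl (fun res b =>
      res ++ [(PySem.Str.join "\n" (b.map Prod.fst), (PySem.List.pyGetD b 0 ("", 0)).2)]) []

-- ===== PORT B =====
def fusionner_commentaires_en_bloc_alt (comment_list : List (String × Int)) : List (String × Int) :=
  match comment_list with
  | [] => []  -- comment_list[-1] raises IndexError on an empty list: outside Pre_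
  | _ :: _ =>
    let blocks := [PySem.List.pyGetD comment_list (-1) ("", 0)]
    let blocks := ((PySem.List.slice comment_list none (some (-1))).reverse).foldl
      (fun blocks p =>
        let top := blocks.getLastD ("", 0)
        if top.2 == p.2 + 1 then blocks.dropLast ++ [(p.1 ++ "\n" ++ top.1, p.2)]
        else blocks ++ [p])
      blocks
    blocks.reverse

-- ===== PRECONDITION & SPEC =====
-- Pre_ excludes only the empty list, on which A (and B) raise IndexError.
def Pre_fusionner_commentaires_en_bloc (comment_list : List (String × Int)) : Prop :=
  comment_list ≠ []
instance (comment_list : List (String × Int)) : Decidable (Pre_fusionner_commentaires_en_bloc comment_list) := by unfold Pre_fusionner_commentaires_en_bloc; infer_instance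
def pvWitness_fusionner_commentaires_en_bloc : (List (String × Int)) := [("a", 1), ("b", 2), ("c", 5)]
def Spec_fusionner_commentaires_en_bloc (comment_list : List (String × Int)) (out : List (String × Int)) : Prop := out = fusionner_commentaires_en_bloc_alt comment_list
instance (comment_list : List (String × Int)) (out : List (String × Int)) : Decidable (Spec_fusionner_commentaires_en_bloc comment_list out) := by unfold Spec_fusionner_commentaires_en_bloc; infer_instance

-- ===== CLAIM (what is proved, stated in full; the proofs are below) =====
def Claim_equal_fusionner_commentaires_en_bloc : Prop := ∀ (comment_list : List (String × Int)), Dom_fusionner_commentaires_en_bloc comment_list → Pre_fusionner_commentaires_en_bloc comment_list → Spec_fusionner_commentaires_en_bloc comment_list (fusionner_commentaires_en_bloc comment_list)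

-- ===== LEMMAS AND PROOFS =====

-- The common specification: split into runs of consecutive line numbers, top-down.
def pvRuns (c : String × Int) (rest : List (String × Int)) : List (List (String × Int)) :=
  match rest with
  | [] => [[c]]
  | r :: t =>
    if r.2 == c.2 + 1 then (c :: (pvRuns r t).headD []) :: (pvRuns r t).tail
    else [c] :: pvRuns r t

def pvOutf (b : List (String × Int)) : String × Int :=
  (PySem.Str.join "\n" (b.map Prod.fst), (b.headD ("", 0)).2)

theorem pvRuns_head (c : String × Int) (rest : List (String × Int)) :
    ∃ h tl, pvRuns c rest = (c :: h) :: tl := by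
  cases rest with
  | nil => exact ⟨[], [], rfl⟩
  | cons r t =>
    unfold pvRuns
    split
    · exact ⟨_, _, rfl⟩
    · exact ⟨[], _, rfl⟩

theorem pvJoin_singleton (x : String) : PySem.Str.join "\n" [x] = x := by
  apply String.toList_inj.mp
  simp [PySem.Str.toList_join, PySem.Chars.join_singleton]

theorem pvJoin_cons_cons (x y : String) (t : List String) :
    PySem.Str.join "\n" (x :: y :: t) = x ++ "\n" ++ PySem.Str.join "\n" (y :: t) := by
  apply String.toList_inj.mp
  simp [PySem.Str.toList_join, PySem.Chars.join_cons_cons]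

-- A's loop body seen as a function of the (previous, current) pair.
def pvG (st : List (List (String × Int)) × List (String × Int)) (pc : (String × Int) × (String × Int)) :
    List (List (String × Int)) × List (String × Int) :=
  if pc.2.2 == pc.1.2 + 1 then (st.1, st.2 ++ [pc.2]) else (st.1 ++ [st.2], [pc.2])

theorem pv_map_pairs (cl : List (String × Int)) :
    (PySem.List.pyRange 1 (cl.length : Int) 1).map
      (fun i => (PySem.List.pyGetD cl (i - 1) ("", 0), PySem.List.pyGetD cl i ("", 0)))
      = cl.zip cl.tail := by
  rw [PySem.List.pyRange_one, List.map_map]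
  apply List.ext_getElem
  · simp [List.length_zip]
  · intro i h1 h2
    simp only [List.getElem_map, List.getElem_range, Function.comp_apply, List.getElem_zip,
      List.getElem_tail]
    have e1 : (1 : Int) + (i : Int) - 1 = ((i : Nat) : Int) := by omega
    have e2 : (1 : Int) + (i : Int) = (((i + 1 : Nat)) : Int) := by omega
    rw [e1, e2, PySem.List.pyGetD_natCast, PySem.List.pyGetD_natCast]
    have hz : i + 1 < cl.length := by
      simp [List.length_zip] at h2; omega
    rw [List.getD_eq_getElem _ _ (by omega), List.getD_eq_getElem _ _ hz]

theorem pv_foldG (cl : List (String × Int)) (init : List (List (String × Int)) × List (String × Int)) :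
    (PySem.List.pyRange 1 (cl.length : Int) 1).foldl
      (fun st i => pvG st (PySem.List.pyGetD cl (i - 1) ("", 0), PySem.List.pyGetD cl i ("", 0)))
      init = (cl.zip cl.tail).foldl pvG init := by
  rw [← pv_map_pairs cl, List.foldl_map]

theorem pvAfold (rest : List (String × Int)) (blocs : List (List (String × Int)))
    (bloc : List (String × Int)) (p : String × Int) :
    (let st := ((p :: rest).zip rest).foldl pvG (blocs, bloc ++ [p]);
     st.1 ++ [st.2]) = blocs ++ ((bloc ++ (pvRuns p rest).headD []) :: (pvRuns p rest).tail) := by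
  induction rest generalizing blocs bloc p with
  | nil => simp [pvRuns]
  | cons c t ih =>
    simp only [List.zip_cons_cons, List.foldl_cons]
    by_cases h : c.2 = p.2 + 1
    · have hstep : pvG (blocs, bloc ++ [p]) (p, c) = (blocs, (bloc ++ [p]) ++ [c]) := by
        simp [pvG, h]
      rw [hstep]
      have h2 := ih blocs (bloc ++ [p]) c
      simp only at h2
      rw [h2]
      simp [pvRuns, h]
    · have hstep : pvG (blocs, bloc ++ [p]) (p, c) = (blocs ++ [bloc ++ [p]], [c]) := by
        simp [pvG, h]
      rw [hstep]
      have h2 := ih (blocs ++ [bloc ++ [p]]) [] c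
      simp only [List.nil_append] at h2
      rw [h2]
      obtain ⟨hh, tl, e⟩ := pvRuns_head c t
      simp [pvRuns, h, e]

theorem pvA_eq (c0 : String × Int) (rest : List (String × Int)) :
    fusionner_commentaires_en_bloc (c0 :: rest) = (pvRuns c0 rest).map pvOutf := by
  show ((fun F : List (List (String × Int)) × List (String × Int) =>
      (F.1 ++ [F.2]).foldl (fun res b =>
        res ++ [(PySem.Str.join "\n" (b.map Prod.fst), (PySem.List.pyGetD b 0 ("", 0)).2)]) [])
    ((PySem.List.pyRange 1 (((c0 :: rest).length : Int)) 1).foldl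
      (fun st i => pvG st (PySem.List.pyGetD (c0 :: rest) (i - 1) ("", 0),
                           PySem.List.pyGetD (c0 :: rest) i ("", 0)))
      ([], [c0]))) = _
  beta_reduce
  rw [pv_foldG]
  simp only [List.tail_cons]
  have h2 := pvAfold rest [] [] c0
  simp only [List.nil_append] at h2
  rw [h2]
  rw [PySem.List.foldl_append_singleton_eq_map]
  obtain ⟨hh, tl, e⟩ := pvRuns_head c0 rest
  rw [e]
  simp only [List.nil_append, List.headD_cons, List.tail_cons]
  apply List.map_congr_left
  intro b _
  unfold pvOutf
  cases b with
  | nil => simp [PySem.List.pyGetD_zero]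
  | cons x xs => simp [PySem.List.pyGetD_zero]

-- B's loop body.
def pvStepB (blocks : List (String × Int)) (p : String × Int) : List (String × Int) :=
  let top := blocks.getLastD ("", 0)
  if top.2 == p.2 + 1 then blocks.dropLast ++ [(p.1 ++ "\n" ++ top.1, p.2)]
  else blocks ++ [p]

theorem pv_rev_getLastD (l : List (String × Int)) (d : String × Int) :
    l.reverse.getLastD d = l.headD d := by
  cases l with
  | nil => rfl
  | cons x xs => simp

theorem pvBfold (rest : List (String × Int)) (c : String × Int) :
    ((c :: rest).dropLast).foldr (fun p acc => pvStepB acc p) [(c :: rest).getLastD ("", 0)]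
      = ((pvRuns c rest).map pvOutf).reverse := by
  induction rest generalizing c with
  | nil =>
    simp [pvRuns, pvOutf, pvJoin_singleton]
  | cons r t ih =>
    obtain ⟨hh, tl, e⟩ := pvRuns_head r t
    have hdl : ((c :: r :: t).dropLast) = c :: ((r :: t).dropLast) := rfl
    have hgl : (c :: r :: t).getLastD ("", 0) = (r :: t).getLastD ("", 0) := by simp
    rw [hdl, hgl, List.foldr_cons, ih r]
    have htop2 : (pvOutf (r :: hh)).2 = r.2 := by simp [pvOutf]
    unfold pvStepB
    rw [e]
    simp only [List.map_cons]
    rw [pv_rev_getLastD]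
    simp only [List.headD_cons]
    rw [htop2]
    conv_rhs => rw [pvRuns, e]
    by_cases h : r.2 = c.2 + 1
    · rw [if_pos (by simp [h]), if_pos (by simp [h])]
      rw [List.dropLast_reverse]
      simp only [List.tail_cons, List.headD_cons]
      have hnew : (c.1 ++ "\n" ++ (pvOutf (r :: hh)).1, c.2) = pvOutf (c :: r :: hh) := by
        simp [pvOutf, pvJoin_cons_cons]
      rw [hnew, ← List.reverse_cons]
      simp
    · rw [if_neg (by simp [h]), if_neg (by simp [h])]
      have hc : c = pvOutf [c] := by simp [pvOutf, pvJoin_singleton]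
      conv_lhs => rw [hc, ← List.reverse_cons]
      simp

theorem pvB_eq (c0 : String × Int) (rest : List (String × Int)) :
    fusionner_commentaires_en_bloc_alt (c0 :: rest) = (pvRuns c0 rest).map pvOutf := by
  show (((PySem.List.slice (c0 :: rest) none (some (-1))).reverse).foldl pvStepB
      [PySem.List.pyGetD (c0 :: rest) (-1) ("", 0)]).reverse = _
  rw [PySem.List.slice_to_neg_one, List.foldl_reverse]
  have hlast : PySem.List.pyGetD (c0 :: rest) (-1) ("", 0) = (c0 :: rest).getLastD ("", 0) := by
    rw [PySem.List.pyGetD_neg_one _ _ (by simp)]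
    simp [List.getLastD_eq_getLast?, List.getLast?_eq_some_getLast]
  rw [hlast, pvBfold rest c0]
  simp

-- ===== VERDICT (by name: the statement is the Claim_ definition above) =====
theorem fusionner_commentaires_en_bloc_spec : Claim_equal_fusionner_commentaires_en_bloc := by
  intro cl _ hpre
  unfold Spec_fusionner_commentaires_en_bloc
  cases cl with
  | nil => exact absurd rfl hpre
  | cons c rest => rw [pvA_eq, pvB_eq]
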